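-- pv_equiv track=rewrite | github.com/waal42/AdventOfCode | 2018/day08.py | parse
-- ===== SOURCE A (Python) =====
-- def parse(data):
--     children, metas = data[:2]
--     data = data[2:]
--     scores = list()
--     totals = 0
--     for i in range(children):
--         total, score, data = parse(data)
--         totals += total
--         scores.append(score)
--
--     totals += sum(data[:metas])
--
--     if children == 0:
--         return (totals, sum(data[:metas]), data[metas:])
--     else:
--         return (
--             totals,
--             sum(scores[k - 1] for k in data[:metas] if k > 0 and k <= len(scores)),
--             data[metas:],
--         )
-- ===== SOURCE B (Python) =====
-- def parse(data):
--     # Iterative parser: explicit stack of frames instead of recursion.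
--     children, metas = data[0], data[1]
--     data = data[2:]
--     stack = [[children, metas, children == 0, 0, []]]
--     while True:
--         rem, m, leaf, totals, scores = stack[-1]
--         if rem > 0:
--             stack[-1][0] = rem - 1
--             c, mm = data[0], data[1]
--             data = data[2:]
--             stack.append([c, mm, c == 0, 0, []])
--         else:
--             meta = data[:m]
--             data = data[m:]
--             msum = sum(meta)
--             total = totals + msum
--             if leaf:
--                 score = msum
--             else:
--                 score = sum(scores[k - 1] for k in meta if k > 0 and k <= len(scores))
--             stack.pop()
--             if not stack:
--                 return (total, score, data)
--             stack[-1][3] += total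
--             stack[-1][4].append(score)
-- ===== Notes on version B (the rewrite author's own statement) =====
-- stated objective: alternative
-- what changed: Replaced the recursive-descent parser by an iterative parser driven by an explicit stack of frames (remaining children, metadata count, leaf flag, running total, child scores); no Python recursion, so deep trees no longer hit the recursion limit.
-- outside the precondition, e.g. on parse([]): A raises ValueError, B raises IndexError; on parse([2, 0, 0]): A raises ValueError, B raises IndexError
import Mathlib
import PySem

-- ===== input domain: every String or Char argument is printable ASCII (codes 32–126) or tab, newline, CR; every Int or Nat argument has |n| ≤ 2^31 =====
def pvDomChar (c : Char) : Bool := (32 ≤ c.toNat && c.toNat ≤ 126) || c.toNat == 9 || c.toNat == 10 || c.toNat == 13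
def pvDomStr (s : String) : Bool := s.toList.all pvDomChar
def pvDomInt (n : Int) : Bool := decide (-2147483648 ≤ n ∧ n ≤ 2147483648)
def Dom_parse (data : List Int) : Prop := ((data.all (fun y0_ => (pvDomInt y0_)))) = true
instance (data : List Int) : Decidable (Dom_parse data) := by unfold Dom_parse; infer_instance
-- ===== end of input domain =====

-- B replaces A's recursive-descent parser by an iterative explicit-stack parser (same return value, no Python recursion).

-- shared helper: sum(scores[k-1] for k in meta if k > 0 and k <= len(scores)) — this genexp occurs verbatim in both Pythons
def scoreSum (scores mta : List Int) : Int :=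
  (mta.map (fun k => if 0 < k ∧ k ≤ (scores.length : Int) then scores.getD (k - 1).toNat 0 else 0)).sum

-- ===== PORT A =====
-- fuel-indexed transliteration of A's recursion; the for-loop over range(children) is the
-- iterate of its body on the loop state (totals, scores, data); fuel data.length suffices
-- whenever A returns (depth ≤ len/2), and outside Pre_parse the value is unconstrained.
def parseF : Nat → List Int → Int × Int × List Int
  | 0, _ => (0, 0, [])
  | f + 1, c :: m :: rest =>
      let r := (fun s : Int × List Int × List Int =>
                  let x := parseF f s.2.2
                  (s.1 + x.1, s.2.1 ++ [x.2.1], x.2.2))^[c.toNat] (0, [], rest)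
      let mta := PySem.List.slice r.2.2 none (some m)
      let totals := r.1 + mta.sum
      if c = 0 then (totals, mta.sum, PySem.List.slice r.2.2 (some m) none)
      else (totals, scoreSum r.2.1 mta, PySem.List.slice r.2.2 (some m) none)
  | _ + 1, _ => (0, 0, [])   -- A raises ValueError here (fewer than 2 tokens); outside Pre_parse

def parse (data : List Int) : Int × Int × List Int := parseF data.length data

-- ===== PORT B =====
structure PFrame where
  rem : Int
  metas : Int
  leaf : Bool
  totals : Int
  scores : List Int
deriving Repr, DecidableEq

-- the while-loop of B, fuel-indexed (one unit per loop iteration; data.length + 1 suffices)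
def run : Nat → List Int → List PFrame → Int × Int × List Int
  | 0, _, _ => (0, 0, [])
  | _ + 1, _, [] => (0, 0, [])
  | g + 1, d, F :: S =>
    if 0 < F.rem then
      match d with
      | c :: mm :: d' =>
          run g d' (⟨c, mm, c == 0, 0, []⟩ :: { F with rem := F.rem - 1 } :: S)
      | _ => (0, 0, [])    -- B raises IndexError here; outside Pre_parse
    else
      let mta := PySem.List.slice d none (some F.metas)
      let msum := mta.sum
      let total := F.totals + msum
      let score := if F.leaf then msum else scoreSum F.scores mta
      match S with
      | [] => (total, score, PySem.List.slice d (some F.metas) none)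
      | P :: S' =>
          run g (PySem.List.slice d (some F.metas) none)
            ({ P with totals := P.totals + total, scores := P.scores ++ [score] } :: S')

def parse_alt (data : List Int) : Int × Int × List Int :=
  match data with
  | c :: m :: rest => run (data.length + 1) rest [⟨c, m, c == 0, 0, []⟩]
  | _ => (0, 0, [])    -- B raises IndexError here; outside Pre_parse

-- ===== PRECONDITION & SPEC =====
-- A raises (ValueError unpacking a short header) exactly when the input does not start with one
-- complete tree encoding; validity of the recursive grammar is itself recursive, so Pre_ uses a
-- shape-only checker (it consumes headers and metadata counts, computing no totals or scores).
def chkN (chk1 : List Int → Option (List Int)) : Nat → List Int → Option (List Int)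
  | 0, d => some d
  | n + 1, d =>
      match chk1 d with
      | none => none
      | some d₁ => chkN chk1 n d₁

def chk : Nat → List Int → Option (List Int)
  | 0, _ => none
  | f + 1, c :: m :: rest =>
      (chkN (chk f) c.toNat rest).map (fun D => PySem.List.slice D (some m) none)
  | _ + 1, _ => none

-- Pre_parse = the inputs on which the Python A returns normally (input starts with one full tree)
def Pre_parse (data : List Int) : Prop := (chk data.length data).isSome = true
instance (data : List Int) : Decidable (Pre_parse data) := by unfold Pre_parse; infer_instance

def pvWitness_parse : List Int := [1, 1, 0, 1, 99, 2]

def Spec_parse (data : List Int) (out : Int × Int × List Int) : Prop := out = parse_alt data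
instance (data : List Int) (out : Int × Int × List Int) : Decidable (Spec_parse data out) := by unfold Spec_parse; infer_instance

-- ===== CLAIM (what is proved, stated in full; the proofs are below) =====
def Claim_equal_parse : Prop := ∀ (data : List Int), Dom_parse data → Pre_parse data → Spec_parse data (parse data)

-- ===== LEMMAS AND PROOFS =====

-- the loop bodies of parseF / chk, named for the proofs
def pstep (f : Nat) : Int × List Int × List Int → Int × List Int × List Int :=
  fun s => let x := parseF f s.2.2; (s.1 + x.1, s.2.1 ++ [x.2.1], x.2.2)

theorem parseF_succ (f : Nat) (c m : Int) (rest : List Int) :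
    parseF (f + 1) (c :: m :: rest) =
      (let r := (pstep f)^[c.toNat] (0, [], rest)
       let mta := PySem.List.slice r.2.2 none (some m)
       let totals := r.1 + mta.sum
       if c = 0 then (totals, mta.sum, PySem.List.slice r.2.2 (some m) none)
       else (totals, scoreSum r.2.1 mta, PySem.List.slice r.2.2 (some m) none)) := rfl

theorem chk_succ (f : Nat) (c m : Int) (rest : List Int) :
    chk (f + 1) (c :: m :: rest) =
      (chkN (chk f) c.toNat rest).map (fun D => PySem.List.slice D (some m) none) := rfl

-- continuation of the machine after one node is fully parsed with result r
def cont (g : Nat) (S : List PFrame) (r : Int × Int × List Int) : Int × Int × List Int :=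
  match S with
  | [] => r
  | P :: S' =>
      run g r.2.2 ({ P with totals := P.totals + r.1, scores := P.scores ++ [r.2.1] } :: S')

theorem length_sliceFrom_le (D : List Int) (m : Int) :
    (PySem.List.slice D (some m) none).length ≤ D.length := by
  rw [PySem.List.slice_some_none]
  simp

theorem chk_shape (f : Nat) (d l : List Int) (h : chk f d = some l) :
    ∃ c m rest, d = c :: m :: rest ∧ 1 ≤ f := by
  cases f with
  | zero => simp [chk] at h
  | succ f =>
    match d with
    | [] => simp [chk] at h
    | [x] => simp [chk] at h
    | c :: m :: rest => exact ⟨c, m, rest, rfl, by omega⟩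

-- what it means for the machine to simulate one fully-parsed node
def NodeConcl (f : Nat) (c m : Int) (rest l : List Int) : Prop :=
  (parseF f (c :: m :: rest)).2.2 = l ∧
  ∀ (S : List PFrame) (g : Nat), rest.length < g →
    ∃ g', g + l.length + 1 ≤ g' + rest.length + 2 ∧ g' ≤ g ∧
      run g rest (⟨c, m, c == 0, 0, []⟩ :: S) = cont g' S (parseF f (c :: m :: rest))

theorem node_sim : ∀ (f : Nat) (c m : Int) (rest l : List Int),
    chk f (c :: m :: rest) = some l → NodeConcl f c m rest l := by
  intro f
  induction f with
  | zero => intro c m rest l h; simp [chk] at h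
  | succ f IH =>
    -- simulation of the children loop: n pending children, machine frame ⟨r, mm, b, t0, ss⟩
    have loop : ∀ (n : Nat) (r t0 : Int) (ss : List Int) (d D : List Int)
        (mm : Int) (b : Bool) (S : List PFrame) (g : Nat),
        r.toNat = n → chkN (chk f) n d = some D → d.length < g →
        ((pstep f)^[n] (t0, ss, d)).2.2 = D ∧
        ∃ g', g + D.length ≤ g' + d.length ∧ g' ≤ g ∧
          run g d (⟨r, mm, b, t0, ss⟩ :: S) =
            run g' D (⟨r - (n : Int), mm, b,
              ((pstep f)^[n] (t0, ss, d)).1, ((pstep f)^[n] (t0, ss, d)).2.1⟩ :: S) := by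
      intro n
      induction n with
      | zero =>
        intro r t0 ss d D mm b S g hr h hg
        simp only [chkN] at h
        cases h
        refine ⟨rfl, g, by omega, le_refl g, ?_⟩
        norm_num
      | succ n ihn =>
        intro r t0 ss d D mm b S g hr h hg
        rw [chkN] at h
        cases hc : chk f d with
        | none => rw [hc] at h; exact absurd h (by simp)
        | some d₁ =>
          rw [hc] at h
          obtain ⟨c₁, m₁, d₂, rfl, -⟩ := chk_shape f d d₁ hc
          obtain ⟨hleft, hrun⟩ := IH c₁ m₁ d₂ d₁ hc
          have hrpos : 0 < r := by omega
          obtain ⟨g₀, rfl⟩ : ∃ g₀, g = g₀ + 1 := ⟨g - 1, by simp at hg; omega⟩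
          have hstep : run (g₀ + 1) (c₁ :: m₁ :: d₂) (⟨r, mm, b, t0, ss⟩ :: S) =
              run g₀ d₂ (⟨c₁, m₁, c₁ == 0, 0, []⟩ :: ⟨r - 1, mm, b, t0, ss⟩ :: S) := by
            simp [run, hrpos]
          obtain ⟨g₁, hb1, hb2, heq⟩ := hrun (⟨r - 1, mm, b, t0, ss⟩ :: S) g₀ (by simp at hg ⊢; omega)
          have hg₁ : d₁.length < g₁ := by
            have := length_sliceFrom_le
            simp at hg
            omega
          have hP : pstep f (t0, ss, (c₁ :: m₁ :: d₂ : List Int)) =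
              (t0 + (parseF f (c₁ :: m₁ :: d₂)).1, ss ++ [(parseF f (c₁ :: m₁ :: d₂)).2.1], d₁) := by
            simp [pstep, hleft]
          have hcont : cont g₁ (⟨r - 1, mm, b, t0, ss⟩ :: S) (parseF f (c₁ :: m₁ :: d₂)) =
              run g₁ d₁ (⟨r - 1, mm, b, t0 + (parseF f (c₁ :: m₁ :: d₂)).1,
                ss ++ [(parseF f (c₁ :: m₁ :: d₂)).2.1]⟩ :: S) := by
            simp [cont, hleft]
          obtain ⟨hres, g₂, hc1, hc2, heq₂⟩ :=
            ihn (r - 1) (t0 + (parseF f (c₁ :: m₁ :: d₂)).1) (ss ++ [(parseF f (c₁ :: m₁ :: d₂)).2.1])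
              d₁ D mm b S g₁ (by omega) h hg₁
          have hiter : (pstep f)^[n + 1] (t0, ss, (c₁ :: m₁ :: d₂ : List Int)) =
              (pstep f)^[n] (t0 + (parseF f (c₁ :: m₁ :: d₂)).1,
                ss ++ [(parseF f (c₁ :: m₁ :: d₂)).2.1], d₁) := by
            rw [Function.iterate_succ_apply, hP]
          refine ⟨by rw [hiter]; exact hres, g₂, ?_, by omega, ?_⟩
          · simp at hg ⊢
            omega
          · rw [hstep, heq, hcont, heq₂, hiter]
            have : r - 1 - (n : Int) = r - ((n : Nat) + 1 : Nat) := by push_cast; ring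
            rw [this]
    intro c m rest l h
    rw [chk_succ] at h
    rcases Option.map_eq_some_iff.mp h with ⟨D, hD, rfl⟩
    have hlen := length_sliceFrom_le D m
    constructor
    · have h1 := (loop c.toNat c 0 [] rest D m (c == 0) [] (rest.length + 1)
        rfl hD (by omega)).1
      rw [parseF_succ]
      by_cases hc0 : c = 0
      · have hDr : D = rest := by
          rw [hc0] at hD
          simpa [chkN] using hD.symm
        simp [hc0, hDr]
      · simp [hc0, h1]
    · intro S g hg
      obtain ⟨h1, g₂, hb1, hb2, heq⟩ :=
        loop c.toNat c 0 [] rest D m (c == 0) S g rfl hD hg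
      obtain ⟨g₃, rfl⟩ : ∃ g₃, g₂ = g₃ + 1 := ⟨g₂ - 1, by omega⟩
      have hle : ¬ (0 : Int) < c - (c.toNat : Int) := by omega
      refine ⟨g₃, by omega, by omega, ?_⟩
      rw [heq, parseF_succ]
      by_cases hc0 : c = 0
      · have hDr : D = rest := by
          rw [hc0] at hD
          simpa [chkN] using hD.symm
        cases S <;> simp [run, cont, hc0, hDr]
      · cases S <;> simp [run, cont, hc0, h1]
-- ===== VERDICT (by name: the statement is the Claim_ definition above) =====
theorem parse_spec : Claim_equal_parse := by
  intro data hDom hPre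
  unfold Pre_parse at hPre
  obtain ⟨l, hl⟩ := Option.isSome_iff_exists.mp hPre
  obtain ⟨c, m, rest, rfl, -⟩ := chk_shape _ _ _ hl
  obtain ⟨hleft, hrun⟩ := node_sim _ _ _ _ _ hl
  obtain ⟨g', -, -, heq⟩ := hrun [] ((c :: m :: rest).length + 1) (by simp; omega)
  show parse _ = parse_alt _
  simp only [parse, parse_alt]
  simpa [cont] using heq.symm
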